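-- pv_equiv track=rewrite | github.com/YichenGao/mlsp-project | tkr/build_db.py | generate_hashes
-- ===== SOURCE A (Python) =====
-- TARGET_ZONE_T_MIN = 1 # Minimum time frames ahead for target zone
--
-- TARGET_ZONE_T_MAX = 50 # Maximum time frames ahead for target zone
--
-- TARGET_ZONE_F_MIN = -30 # Frequency bin lower bound for target zone
--
-- TARGET_ZONE_F_MAX = 30 # Frequency bin upper bound for target zone
--
-- def generate_hashes(constellation_map):
--     """Make triplet hashes from a constellation map."""
--     hashes = []
--     # Sort by time to easily look ahead
--     constellation_map.sort(key=lambda x: x[1])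
--
--     for i in range(len(constellation_map)):
--         f_anchor, t_anchor = constellation_map[i]
--
--         # Look ahead to form target zones
--         for j in range(i + 1, len(constellation_map)):
--             f_target, t_target = constellation_map[j]
--             delta_t = t_target - t_anchor
--
--             # Check if target is within the valid time-frequency zone
--             if TARGET_ZONE_T_MIN <= delta_t <= TARGET_ZONE_T_MAX:
--                 if TARGET_ZONE_F_MIN <= (f_target - f_anchor) <= TARGET_ZONE_F_MAX:
--                     # Create the triplet hash: (f_anchor, f_target, delta_t)
--                     hash_str = f"{f_anchor}|{f_target}|{delta_t}"
--                     hashes.append((hash_str, t_anchor))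
--             elif delta_t > TARGET_ZONE_T_MAX:
--                 break # Moved past the target zone
--     return hashes
-- ===== SOURCE B (Python) =====
-- TARGET_ZONE_T_MIN = 1 # Minimum time frames ahead for target zone
--
-- TARGET_ZONE_T_MAX = 50 # Maximum time frames ahead for target zone
--
-- TARGET_ZONE_F_MIN = -30 # Frequency bin lower bound for target zone
--
-- TARGET_ZONE_F_MAX = 30 # Frequency bin upper bound for target zone
--
-- def generate_hashes(constellation_map):
--     """Make triplet hashes from a constellation map (time-bucket index version)."""
--     # Same in-place sort by time as the original (observable mutation kept).
--     constellation_map.sort(key=lambda x: x[1])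
--
--     # Index: time frame -> list of frequencies at that frame, in list order.
--     buckets = {}
--     for f, t in constellation_map:
--         buckets.setdefault(t, []).append(f)
--
--     hashes = []
--     for f_anchor, t_anchor in constellation_map:
--         for delta_t in range(TARGET_ZONE_T_MIN, TARGET_ZONE_T_MAX + 1):
--             for f_target in buckets.get(t_anchor + delta_t, []):
--                 if TARGET_ZONE_F_MIN <= (f_target - f_anchor) <= TARGET_ZONE_F_MAX:
--                     hashes.append((f"{f_anchor}|{f_target}|{delta_t}", t_anchor))
--     return hashes
-- ===== Notes on version B (the rewrite author's own statement) =====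
-- stated objective: alternative
-- what changed: Replaces the per-anchor forward scan over the sorted list (with a break past the time window) by a dict index from time frame to its frequencies, built in one pass, then for each anchor iterates delta_t = 1..50 and reads the bucket at t_anchor + delta_t.
import Mathlib
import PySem

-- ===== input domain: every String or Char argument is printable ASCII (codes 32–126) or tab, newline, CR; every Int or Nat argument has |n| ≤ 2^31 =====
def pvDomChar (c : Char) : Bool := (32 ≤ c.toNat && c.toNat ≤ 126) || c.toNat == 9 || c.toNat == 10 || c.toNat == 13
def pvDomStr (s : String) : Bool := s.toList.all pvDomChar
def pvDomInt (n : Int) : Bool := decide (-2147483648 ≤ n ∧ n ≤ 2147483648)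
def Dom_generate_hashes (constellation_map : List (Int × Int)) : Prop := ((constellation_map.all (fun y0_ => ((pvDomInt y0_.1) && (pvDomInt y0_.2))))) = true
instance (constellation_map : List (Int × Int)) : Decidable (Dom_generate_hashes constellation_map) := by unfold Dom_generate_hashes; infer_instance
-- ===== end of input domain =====

-- B builds a time->frequencies dict once and iterates delta_t = 1..50 per anchor instead of
-- A's forward scan with a break; both Pythons sort the caller's list in place (same mutation), return value proved equal.


-- shared by both ports: the f-string f"{f_anchor}|{f_target}|{delta_t}" (exact: PySem.Int.toChars = str(n))
def ghHash (fa ft dt : Int) : String :=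
  String.ofList (PySem.Int.toChars fa ++ '|' :: PySem.Int.toChars ft ++ '|' :: PySem.Int.toChars dt)

-- ===== PORT A =====
-- inner 'for j in range(i+1, len)' loop over the points after the anchor, with the 'break'
def ghInnerA (f_anchor t_anchor : Int) : List (Int × Int) → List (String × Int)
  | [] => []
  | p :: rest =>
    if 1 ≤ p.2 - t_anchor ∧ p.2 - t_anchor ≤ 50 then
      (if -30 ≤ p.1 - f_anchor ∧ p.1 - f_anchor ≤ 30 then
        (ghHash f_anchor p.1 (p.2 - t_anchor), t_anchor) :: ghInnerA f_anchor t_anchor rest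
      else ghInnerA f_anchor t_anchor rest)
    else if p.2 - t_anchor > 50 then []    -- break
    else ghInnerA f_anchor t_anchor rest

-- outer 'for i in range(len)' loop: anchor = point i, scan the suffix after it
def ghOuterA : List (Int × Int) → List (String × Int)
  | [] => []
  | p :: rest => ghInnerA p.1 p.2 rest ++ ghOuterA rest

def generate_hashes (constellation_map : List (Int × Int)) : List (String × Int) :=
  ghOuterA (PySem.List.sorted constellation_map (fun x => x.2) false)

-- ===== PORT B =====
def generate_hashes_alt (constellation_map : List (Int × Int)) : List (String × Int) :=
  let s := PySem.List.sorted constellation_map (fun x => x.2) false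
  -- buckets: time frame -> frequencies at that frame ('buckets.setdefault(t, []).append(f)')
  let buckets := s.foldl (fun d p => d.modify p.2 [] (fun l => l ++ [p.1])) PySem.Dict.empty
  s.flatMap (fun a =>
    (PySem.List.pyRange 1 51 1).flatMap (fun dt =>
      (buckets.getD (a.2 + dt) []).filterMap (fun ft =>
        if -30 ≤ ft - a.1 ∧ ft - a.1 ≤ 30 then some (ghHash a.1 ft dt, a.2) else none)))

-- ===== PRECONDITION & SPEC =====
def Spec_generate_hashes (constellation_map : List (Int × Int)) (out : List (String × Int)) : Prop := out = generate_hashes_alt constellation_map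
instance (constellation_map : List (Int × Int)) (out : List (String × Int)) : Decidable (Spec_generate_hashes constellation_map out) := by unfold Spec_generate_hashes; infer_instance

-- ===== CLAIM (what is proved, stated in full; the proofs are below) =====
def Claim_equal_generate_hashes : Prop := ∀ (constellation_map : List (Int × Int)), Dom_generate_hashes constellation_map → Spec_generate_hashes constellation_map (generate_hashes constellation_map)

-- ===== LEMMAS AND PROOFS =====

-- the combined per-point selector: the window test and the emitted pair
def ghSel (f_anchor t_anchor : Int) (p : Int × Int) : Option (String × Int) :=
  if 1 ≤ p.2 - t_anchor ∧ p.2 - t_anchor ≤ 50 ∧ -30 ≤ p.1 - f_anchor ∧ p.1 - f_anchor ≤ 30 then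
    some (ghHash f_anchor p.1 (p.2 - t_anchor), t_anchor)
  else none

theorem ghSel_none_of_far (f t : Int) (p : Int × Int) (h : 50 < p.2 - t) : ghSel f t p = none := by
  unfold ghSel
  rw [if_neg]
  omega

-- A's inner loop on a time-sorted suffix is the filterMap of the selector (the break is safe)
theorem ghInnerA_eq_filterMap (f t : Int) (l : List (Int × Int))
    (hs : l.Pairwise (fun a b => a.2 ≤ b.2)) :
    ghInnerA f t l = l.filterMap (ghSel f t) := by
  induction l with
  | nil => rfl
  | cons p rest ih =>
    rw [List.pairwise_cons] at hs
    rw [List.filterMap_cons]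
    simp only [ghInnerA]
    by_cases h1 : 1 ≤ p.2 - t ∧ p.2 - t ≤ 50
    · rw [if_pos h1]
      by_cases h2 : -30 ≤ p.1 - f ∧ p.1 - f ≤ 30
      · have hsel : ghSel f t p = some (ghHash f p.1 (p.2 - t), t) := by
          unfold ghSel; rw [if_pos ⟨h1.1, h1.2, h2.1, h2.2⟩]
        rw [if_pos h2, hsel, ih hs.2]
      · have hsel : ghSel f t p = none := by
          unfold ghSel; rw [if_neg (fun hc => h2 ⟨hc.2.2.1, hc.2.2.2⟩)]
        rw [if_neg h2, hsel, ih hs.2]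
    · rw [if_neg h1]
      by_cases h3 : 50 < p.2 - t
      · have hnil : rest.filterMap (ghSel f t) = [] := by
          rw [List.filterMap_eq_nil_iff]
          intro a ha
          exact ghSel_none_of_far f t a (by have := hs.1 a ha; omega)
        rw [if_pos h3, ghSel_none_of_far f t p h3, hnil]
      · have hsel : ghSel f t p = none := by
          unfold ghSel; rw [if_neg (fun hc => h1 ⟨hc.1, hc.2.1⟩)]
        rw [if_neg h3, hsel, ih hs.2]

-- the bucket at τ holds exactly the frequencies of the points at time τ, in list order
theorem gh_bucket (s : List (Int × Int)) (τ : Int) :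
    (s.foldl (fun d p => d.modify p.2 [] (fun l => l ++ [p.1])) PySem.Dict.empty).getD τ [] =
      (s.filter (fun p => p.2 == τ)).map (·.1) := by
  have hmap : s.foldl (fun d p => d.modify p.2 [] (fun l => l ++ [p.1])) PySem.Dict.empty
      = (s.map (fun p => (p.2, p.1))).foldl (fun d q => d.modify q.1 [] (fun l => l ++ [q.2])) PySem.Dict.empty := by
    rw [List.foldl_map]
  rw [hmap, PySem.Dict.getD_foldl_modify_append, PySem.Dict.getD_empty]
  simp [List.filter_map, List.map_map, Function.comp_def]

-- splitting off the lowest time value from a window filter on a sorted list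
theorem gh_filter_split (l : List (Int × Int)) (lo hi : Int)
    (hs : l.Pairwise (fun a b => a.2 ≤ b.2)) (hlt : lo < hi) :
    l.filter (fun p => decide (lo ≤ p.2 ∧ p.2 < hi)) =
      l.filter (fun p => p.2 == lo) ++ l.filter (fun p => decide (lo + 1 ≤ p.2 ∧ p.2 < hi)) := by
  induction l with
  | nil => rfl
  | cons p rest ih =>
    rw [List.pairwise_cons] at hs
    rcases lt_trichotomy p.2 lo with h | h | h
    · -- p below the window: drops from all three filters
      have e1 : (decide (lo ≤ p.2 ∧ p.2 < hi)) = false := by rw [decide_eq_false_iff_not]; omega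
      have e2 : (p.2 == lo) = false := by rw [beq_eq_false_iff_ne]; omega
      have e3 : (decide (lo + 1 ≤ p.2 ∧ p.2 < hi)) = false := by rw [decide_eq_false_iff_not]; omega
      simp only [List.filter_cons, e1, e2, e3, Bool.false_eq_true, if_false]
      exact ih hs.2
    · -- p.2 = lo: head of both sides
      have e1 : (decide (lo ≤ p.2 ∧ p.2 < hi)) = true := by rw [decide_eq_true_iff]; omega
      have e2 : (p.2 == lo) = true := by rw [beq_iff_eq]; omega
      have e3 : (decide (lo + 1 ≤ p.2 ∧ p.2 < hi)) = false := by rw [decide_eq_false_iff_not]; omega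
      simp only [List.filter_cons, e1, e2, e3, if_true, Bool.false_eq_true, if_false, List.cons_append]
      rw [ih hs.2]
    · -- p.2 > lo: nothing equals lo any more, and the two window filters agree
      have hall : ∀ q ∈ p :: rest, lo < q.2 := by
        intro q hq
        rcases List.mem_cons.mp hq with rfl | hq'
        · exact h
        · have := hs.1 q hq'; omega
      have hnil : (p :: rest).filter (fun p => p.2 == lo) = [] := by
        rw [List.filter_eq_nil_iff]
        intro q hq
        have := hall q hq
        simp only [beq_iff_eq]; omega
      have heq : (p :: rest).filter (fun p => decide (lo ≤ p.2 ∧ p.2 < hi)) =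
          (p :: rest).filter (fun p => decide (lo + 1 ≤ p.2 ∧ p.2 < hi)) := by
        apply List.filter_congr
        intro q hq
        have := hall q hq
        rw [decide_eq_decide]; omega
      rw [hnil, List.nil_append, heq]

-- flatMap over the integer range [lo, hi) of per-time buckets = one window filter (sorted list)
theorem gh_range_flatMap (g : (Int × Int) → Option (String × Int)) (l : List (Int × Int)) (lo hi : Int)
    (hs : l.Pairwise (fun a b => a.2 ≤ b.2)) :
    (PySem.List.pyRange lo hi 1).flatMap (fun τ => (l.filter (fun p => p.2 == τ)).filterMap g) =
      (l.filter (fun p => decide (lo ≤ p.2 ∧ p.2 < hi))).filterMap g := by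
  have main : ∀ n : Nat, ∀ lo : Int, (hi - lo).toNat = n →
      (PySem.List.pyRange lo hi 1).flatMap (fun τ => (l.filter (fun p => p.2 == τ)).filterMap g) =
        (l.filter (fun p => decide (lo ≤ p.2 ∧ p.2 < hi))).filterMap g := by
    intro n
    induction n with
    | zero =>
      intro lo h0
      have hle' : hi ≤ lo := by omega
      have hnl : l.filter (fun p => decide (lo ≤ p.2 ∧ p.2 < hi)) = [] := by
        rw [List.filter_eq_nil_iff]
        intro q _
        simp only [decide_eq_true_eq]; omega
      rw [PySem.List.pyRange_one_eq_nil hle', hnl]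
      rfl
    | succ n ih =>
      intro lo h0
      have hlt : lo < hi := by omega
      rw [PySem.List.pyRange_one_cons hlt, List.flatMap_cons,
        ih (lo + 1) (by omega), gh_filter_split l lo hi hs hlt, List.filterMap_append]
  exact main (hi - lo).toNat lo rfl

-- ghSel is none outside the 50-frame window, so the window filter is absorbed
theorem gh_window (fa ta : Int) (l : List (Int × Int)) :
    (l.filter (fun p => decide (ta + 1 ≤ p.2 ∧ p.2 < ta + 51))).filterMap (ghSel fa ta) =
      l.filterMap (ghSel fa ta) := by
  induction l with
  | nil => rfl
  | cons q tl ih =>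
    rw [List.filter_cons, List.filterMap_cons]
    by_cases hw : ta + 1 ≤ q.2 ∧ q.2 < ta + 51
    · have e : (decide (ta + 1 ≤ q.2 ∧ q.2 < ta + 51)) = true := by rw [decide_eq_true_iff]; omega
      rw [e, if_pos rfl, List.filterMap_cons, ih]
    · have e : (decide (ta + 1 ≤ q.2 ∧ q.2 < ta + 51)) = false := by rw [decide_eq_false_iff_not]; omega
      have hsel : ghSel fa ta q = none := by
        unfold ghSel; rw [if_neg (fun hc => hw ⟨by omega, by omega⟩)]
      rw [e, hsel]
      simp only [Bool.false_eq_true, if_false]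
      exact ih

-- B's per-anchor body, on the dict of s, equals the selector filterMap over the points after the anchor
theorem gh_anchor (s pre rest : List (Int × Int)) (a : Int × Int)
    (hsplit : s = pre ++ a :: rest)
    (hs : s.Pairwise (fun x y => x.2 ≤ y.2)) :
    (PySem.List.pyRange 1 51 1).flatMap (fun dt =>
        ((s.foldl (fun d p => d.modify p.2 [] (fun l => l ++ [p.1])) PySem.Dict.empty).getD (a.2 + dt) []).filterMap
          (fun ft => if -30 ≤ ft - a.1 ∧ ft - a.1 ≤ 30 then some (ghHash a.1 ft dt, a.2) else none)) =
      rest.filterMap (ghSel a.1 a.2) := by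
  have hpre : ∀ q ∈ pre ++ [a], q.2 ≤ a.2 := by
    intro q hq
    rcases List.mem_append.mp hq with hq' | hq'
    · subst hsplit
      rw [List.pairwise_append] at hs
      exact hs.2.2 q hq' a (List.mem_cons_self)
    · rw [List.mem_singleton] at hq'
      subst hq'
      exact le_refl _
  -- step 1: each bucket, filtered by the frequency test, is the selector filterMap of one time slice
  have step1 : ∀ dt : Int, 1 ≤ dt → dt ≤ 50 →
      ((s.foldl (fun d p => d.modify p.2 [] (fun l => l ++ [p.1])) PySem.Dict.empty).getD (a.2 + dt) []).filterMap
          (fun ft => if -30 ≤ ft - a.1 ∧ ft - a.1 ≤ 30 then some (ghHash a.1 ft dt, a.2) else none) =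
        (s.filter (fun p => p.2 == a.2 + dt)).filterMap (ghSel a.1 a.2) := by
    intro dt hdt1 hdt2
    rw [gh_bucket, List.filterMap_map]
    apply List.filterMap_congr
    intro p hp
    have hp2 : p.2 = a.2 + dt := by
      have := List.of_mem_filter hp
      rwa [beq_iff_eq] at this
    simp only [Function.comp_def, ghSel, hp2]
    have hdt : a.2 + dt - a.2 = dt := by omega
    rw [hdt]
    by_cases hf : -30 ≤ p.1 - a.1 ∧ p.1 - a.1 ≤ 30
    · rw [if_pos hf, if_pos ⟨by omega, by omega, hf.1, hf.2⟩]
    · rw [if_neg hf, if_neg (fun hc => hf ⟨hc.2.2.1, hc.2.2.2⟩)]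
  -- step 2: reindex the dt-range into a range of absolute times
  have step2 : (PySem.List.pyRange 1 51 1).flatMap (fun dt =>
        ((s.foldl (fun d p => d.modify p.2 [] (fun l => l ++ [p.1])) PySem.Dict.empty).getD (a.2 + dt) []).filterMap
          (fun ft => if -30 ≤ ft - a.1 ∧ ft - a.1 ≤ 30 then some (ghHash a.1 ft dt, a.2) else none)) =
      (PySem.List.pyRange (a.2 + 1) (a.2 + 51) 1).flatMap
        (fun τ => (s.filter (fun p => p.2 == τ)).filterMap (ghSel a.1 a.2)) := by
    have hr : PySem.List.pyRange (a.2 + 1) (a.2 + 51) 1 = (PySem.List.pyRange 1 51 1).map (fun dt => a.2 + dt) := by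
      rw [PySem.List.pyRange_one, PySem.List.pyRange_one, List.map_map]
      have h1 : ((a.2 + 51) - (a.2 + 1)).toNat = ((51 : Int) - 1).toNat := by omega
      rw [h1]
      apply List.map_congr_left
      intro k _
      simp only [Function.comp_def]
      omega
    rw [hr, List.flatMap_map]
    apply List.flatMap_congr
    intro dt hdt
    have hdt' : 1 ≤ dt ∧ dt < 51 := (PySem.List.mem_pyRange_one).mp hdt
    exact step1 dt hdt'.1 (by omega)
  rw [step2, gh_range_flatMap (ghSel a.1 a.2) s (a.2 + 1) (a.2 + 51) hs]
  -- step 3: the window filter on s keeps only points of rest, where the filter is absorbed by ghSel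
  subst hsplit
  rw [List.filter_append, List.filter_cons]
  have hpre2 : pre.filter (fun p => decide (a.2 + 1 ≤ p.2 ∧ p.2 < a.2 + 51)) = [] := by
    rw [List.filter_eq_nil_iff]
    intro q hq
    have := hpre q (List.mem_append.mpr (Or.inl hq))
    simp only [decide_eq_true_eq]; omega
  have ha2 : (decide (a.2 + 1 ≤ a.2 ∧ a.2 < a.2 + 51)) = false := by
    rw [decide_eq_false_iff_not]; omega
  rw [hpre2, ha2]
  simp only [Bool.false_eq_true, if_false, List.nil_append]
  exact gh_window a.1 a.2 rest

-- the outer loop: A over any suffix of the sorted list = B's flatMap over that suffix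
theorem gh_outer (s : List (Int × Int)) (hs : s.Pairwise (fun x y => x.2 ≤ y.2)) :
    ∀ cur pre, s = pre ++ cur →
      ghOuterA cur = cur.flatMap (fun a =>
        (PySem.List.pyRange 1 51 1).flatMap (fun dt =>
          ((s.foldl (fun d p => d.modify p.2 [] (fun l => l ++ [p.1])) PySem.Dict.empty).getD (a.2 + dt) []).filterMap
            (fun ft => if -30 ≤ ft - a.1 ∧ ft - a.1 ≤ 30 then some (ghHash a.1 ft dt, a.2) else none))) := by
  intro cur
  induction cur with
  | nil => intro pre _; rfl
  | cons a rest ih =>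
    intro pre hsplit
    rw [List.flatMap_cons]
    have hrest : rest.Pairwise (fun x y => x.2 ≤ y.2) := by
      rw [hsplit, List.pairwise_append] at hs
      exact (List.pairwise_cons.mp hs.2.1).2
    have hinner : ghInnerA a.1 a.2 rest = rest.filterMap (ghSel a.1 a.2) :=
      ghInnerA_eq_filterMap a.1 a.2 rest hrest
    show ghInnerA a.1 a.2 rest ++ ghOuterA rest = _
    rw [hinner, ← gh_anchor s pre rest a hsplit hs,
      ih (pre ++ [a]) (by rw [hsplit]; simp)]

-- ===== VERDICT (by name: the statement is the Claim_ definition above) =====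
theorem generate_hashes_spec : Claim_equal_generate_hashes := by
  intro cm _
  unfold Spec_generate_hashes generate_hashes generate_hashes_alt
  exact gh_outer (PySem.List.sorted cm (fun x => x.2) false)
    (PySem.List.sorted_pairwise cm (fun x => x.2)) _ [] rfl
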